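-- pv_equiv track=rewrite | github.com/cantafionathan/pokemon | data_processing/gen1/scrape_competitive_movesets.py | expand_moveslots
-- ===== SOURCE A (Python) =====
-- def normalize_move_name(m):
--     s = m.strip().lower()
--     s = s.replace("’", "").replace("‘", "").replace("'", "")
--     s = s.replace(" ", "_").replace("-", "_")
--     return s
--
-- def expand_moveslots(moveslots, normalized_to_original):
--     from itertools import product
--
--     slot_moves = []
--     for slot in moveslots:
--         slot_moves.append([
--             normalize_move_name(mv["move"])
--             for mv in slot if "move" in mv
--         ])
--
--     all_combos = list(product(*slot_moves))
--
--     restored_sets = []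
--     for combo in all_combos:
--         restored = [normalized_to_original.get(m, m) for m in combo]
--         restored_sets.append(restored)
--
--     return restored_sets
-- ===== SOURCE B (Python) =====
-- def expand_moveslots(moveslots, normalized_to_original):
--     # Per-slot pass: normalize each move name and restore the original name at once.
--     slots = []
--     for slot in moveslots:
--         names = []
--         for mv in slot:
--             if "move" in mv:
--                 n = mv["move"].strip().lower()
--                 n = n.replace("\u2019", "").replace("\u2018", "").replace("'", "")
--                 n = n.replace(" ", "_").replace("-", "_")
--                 names.append(normalized_to_original.get(n, n))
--         slots.append(names)
--     # Enumerate the Cartesian product by mixed-radix decoding of a single index: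
--     # combo #i picks slots[k][digit_k] where the digits of i (last slot = least
--     # significant) are taken in the radices len(slots[k]).
--     total = 1
--     for names in slots:
--         total *= len(names)
--     out = []
--     for i in range(total):
--         combo = [None] * len(slots)
--         rem = i
--         for k in range(len(slots) - 1, -1, -1):
--             rem, d = divmod(rem, len(slots[k]))
--             combo[k] = slots[k][d]
--         out.append(combo)
--     return out
-- ===== Notes on version B (the rewrite author's own statement) =====
-- stated objective: alternative
-- what changed: Replaces itertools.product plus a separate restore pass with a single normalize-and-restore per-slot pass followed by mixed-radix enumeration: the i-th combo is obtained by decoding index i with divmod into one digit per slot, instead of building tuples incrementally.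
import Mathlib
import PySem

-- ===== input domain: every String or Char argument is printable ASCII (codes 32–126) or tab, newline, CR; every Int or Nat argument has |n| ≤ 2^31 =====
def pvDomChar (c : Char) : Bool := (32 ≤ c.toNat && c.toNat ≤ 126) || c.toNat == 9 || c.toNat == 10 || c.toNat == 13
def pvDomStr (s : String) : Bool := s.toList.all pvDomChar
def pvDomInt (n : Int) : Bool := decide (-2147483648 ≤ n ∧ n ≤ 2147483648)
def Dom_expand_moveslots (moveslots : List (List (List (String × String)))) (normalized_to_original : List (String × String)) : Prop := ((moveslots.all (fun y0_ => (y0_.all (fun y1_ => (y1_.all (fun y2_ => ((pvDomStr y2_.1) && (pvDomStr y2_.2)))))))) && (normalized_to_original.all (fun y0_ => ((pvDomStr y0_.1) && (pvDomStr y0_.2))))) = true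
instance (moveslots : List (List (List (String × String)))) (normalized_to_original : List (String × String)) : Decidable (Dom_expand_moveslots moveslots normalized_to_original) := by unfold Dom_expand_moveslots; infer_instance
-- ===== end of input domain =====

-- B restores names during the per-slot pass and enumerates the Cartesian product by
-- mixed-radix decoding of a single running index instead of itertools.product + restore pass.

-- ===== PORT A =====
-- normalize_move_name, shared verbatim by both Pythons
def pvNormalize (m : String) : String :=
  let s := PySem.Str.lower (PySem.Str.strip m)
  let s := PySem.Str.replace (PySem.Str.replace (PySem.Str.replace s "’" "") "‘" "") "'" ""
  PySem.Str.replace (PySem.Str.replace s " " "_") "-" "_"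

-- itertools.product(*lists): hand port (not in PySem); exact: first list varies slowest
def pvProduct : List (List String) → List (List String)
  | [] => [[]]
  | s :: rest => s.flatMap (fun x => (pvProduct rest).map (fun t => x :: t))

def expand_moveslots (moveslots : List (List (List (String × String)))) (normalized_to_original : List (String × String)) : List (List String) :=
  let slot_moves := moveslots.foldl (fun acc slot =>
    acc ++ [((slot.filter (fun mv => PySem.Dict.contains (PySem.Dict.mk mv) "move")).map
      (fun mv => pvNormalize (PySem.Dict.getD (PySem.Dict.mk mv) "move" "")))]) []
  let all_combos := pvProduct slot_moves
  all_combos.foldl (fun acc combo =>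
    acc ++ [combo.map (fun m => PySem.Dict.getD (PySem.Dict.mk normalized_to_original) m m)]) []

-- ===== PORT B =====
-- the inner 'for k in range(len(slots)-1, -1, -1)' loop threading rem: positions are
-- filled from the last slot to the first, so the recursion decodes the tail first.
-- slots[k][d] is in range whenever i < total; getD with "" is exact there.
def pvDecodeCombo : List (List String) → Nat → Nat × List String
  | [], rem => (rem, [])
  | s :: rest, rem =>
    let p := pvDecodeCombo rest rem
    (p.1 / s.length, s.getD (p.1 % s.length) "" :: p.2)

def expand_moveslots_alt (moveslots : List (List (List (String × String)))) (normalized_to_original : List (String × String)) : List (List String) :=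
  let slots := moveslots.foldl (fun acc slot =>
    acc ++ [slot.foldl (fun ns mv =>
      if PySem.Dict.contains (PySem.Dict.mk mv) "move" then
        let n := pvNormalize (PySem.Dict.getD (PySem.Dict.mk mv) "move" "")
        ns ++ [PySem.Dict.getD (PySem.Dict.mk normalized_to_original) n n]
      else ns) []]) []
  let total := slots.foldl (fun t names => t * names.length) 1
  (List.range total).foldl (fun out i => out ++ [(pvDecodeCombo slots i).2]) []

-- ===== PRECONDITION & SPEC =====
def Spec_expand_moveslots (moveslots : List (List (List (String × String)))) (normalized_to_original : List (String × String)) (out : List (List String)) : Prop := out = expand_moveslots_alt moveslots normalized_to_original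
instance (moveslots : List (List (List (String × String)))) (normalized_to_original : List (String × String)) (out : List (List String)) : Decidable (Spec_expand_moveslots moveslots normalized_to_original out) := by unfold Spec_expand_moveslots; infer_instance

-- ===== CLAIM (what is proved, stated in full; the proofs are below) =====
def Claim_equal_expand_moveslots : Prop := ∀ (moveslots : List (List (List (String × String)))) (normalized_to_original : List (String × String)), Dom_expand_moveslots moveslots normalized_to_original → Spec_expand_moveslots moveslots normalized_to_original (expand_moveslots moveslots normalized_to_original)

-- ===== LEMMAS AND PROOFS =====

-- the product of the slot lengths, recursively
def pvProdLen : List (List String) → Nat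
  | [] => 1
  | s :: rest => s.length * pvProdLen rest

theorem foldl_mul_length (slots : List (List String)) (a : Nat) :
    slots.foldl (fun t names => t * names.length) a = a * pvProdLen slots := by
  induction slots generalizing a with
  | nil => simp [pvProdLen]
  | cons s rest ih => simp [pvProdLen, ih, Nat.mul_assoc]

theorem pvDecodeCombo_fst (slots : List (List String)) (i : Nat) :
    (pvDecodeCombo slots i).1 = i / pvProdLen slots := by
  induction slots generalizing i with
  | nil => simp [pvDecodeCombo, pvProdLen]
  | cons s rest ih =>
    simp [pvDecodeCombo, pvProdLen, ih, Nat.div_div_eq_div_mul, Nat.mul_comm]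

-- the decoded combo depends only on the index modulo the total
theorem pvDecodeCombo_snd_add (slots : List (List String)) (q i : Nat) :
    (pvDecodeCombo slots (q * pvProdLen slots + i)).2 = (pvDecodeCombo slots i).2 := by
  induction slots generalizing q i with
  | nil => simp [pvDecodeCombo]
  | cons s rest ih =>
    have T := pvProdLen rest
    simp only [pvDecodeCombo, pvProdLen, pvDecodeCombo_fst]
    congr 1
    · -- heads: ((q * (s.length * T) + i) / T) % s.length = (i / T) % s.length
      rcases Nat.eq_zero_or_pos (pvProdLen rest) with h0 | hp
      · simp [h0]
      · have : q * (s.length * pvProdLen rest) + i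
            = i + (q * s.length) * pvProdLen rest := by ring
        rw [this, Nat.add_mul_div_right _ _ hp, Nat.add_mul_mod_self_right]
    · have : q * (s.length * pvProdLen rest) + i
          = (q * s.length) * pvProdLen rest + i := by ring
      rw [this, ih]

theorem range_mul_flatMap (a T : Nat) :
    List.range (a * T) = (List.range a).flatMap (fun q => (List.range T).map (fun r => q * T + r)) := by
  induction a with
  | zero => simp
  | succ a ih =>
    rw [Nat.succ_mul, List.range_add, ih, List.range_succ, List.flatMap_append]
    simp [Nat.add_comm]

theorem getD_range_map (s : List String) :
    (List.range s.length).map (fun q => s.getD q "") = s := by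
  apply List.ext_getElem
  · simp
  · intro i h1 h2
    simp [List.getD_eq_getElem?_getD, h2]

-- itertools.product is mixed-radix enumeration
theorem pvProduct_eq_range_decode (slots : List (List String)) :
    pvProduct slots = (List.range (pvProdLen slots)).map (fun i => (pvDecodeCombo slots i).2) := by
  induction slots with
  | nil => simp [pvProduct, pvProdLen, pvDecodeCombo]
  | cons s rest ih =>
    rw [pvProduct, pvProdLen, range_mul_flatMap, List.map_flatMap]
    rcases Nat.eq_zero_or_pos (pvProdLen rest) with h0 | hp
    · simp [h0] at ih ⊢
      simp [ih]
      simp [List.flatMap]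
    · conv_lhs => rw [← getD_range_map s]
      rw [List.flatMap_map]
      apply List.flatMap_congr
      intro q hq
      rw [List.map_map]
      rw [ih, List.map_map]
      apply List.map_congr_left
      intro r hr
      rw [List.mem_range] at hq hr
      simp only [Function.comp]
      rw [pvDecodeCombo, pvDecodeCombo_fst]
      have hdiv : (q * pvProdLen rest + r) / pvProdLen rest = q := by
        rw [Nat.add_comm, Nat.add_mul_div_right _ _ hp, Nat.div_eq_of_lt hr, Nat.zero_add]
      have hsnd : (pvDecodeCombo rest (q * pvProdLen rest + r)).2 = (pvDecodeCombo rest r).2 :=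
        pvDecodeCombo_snd_add rest q r
      rw [hdiv, hsnd, Nat.mod_eq_of_lt hq]

-- pvProduct commutes with mapping a function over every element of every slot
theorem pvProduct_map (f : String → String) (slots : List (List String)) :
    pvProduct (slots.map (fun s => s.map f)) = (pvProduct slots).map (fun t => t.map f) := by
  induction slots with
  | nil => simp [pvProduct]
  | cons s rest ih =>
    simp [pvProduct, ih, List.flatMap_map, List.map_flatMap, List.map_map, Function.comp_def]

-- ===== VERDICT (by name: the statement is the Claim_ definition above) =====
theorem expand_moveslots_spec : Claim_equal_expand_moveslots := by
  intro moveslots normalized_to_original _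
  unfold Spec_expand_moveslots expand_moveslots expand_moveslots_alt
  simp only [PySem.List.foldl_append_singleton_eq_map, PySem.List.foldl_append_if,
    List.nil_append, foldl_mul_length, Nat.one_mul, ← pvProduct_eq_range_decode]
  rw [← pvProduct_map]
  simp [List.map_map, Function.comp_def]
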